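-- pv_equiv track=rewrite | github.com/fretbuzz/netivus_prototype | flowchart_algo.py | find_point_where_desired_and_actual_paths_diverge
-- ===== SOURCE A (Python) =====
-- def find_point_where_desired_and_actual_paths_diverge(forward_hops_interfaces, desired_path):
--     mismatch_node_index = None
--     for index in range(0, max(len(forward_hops_interfaces), len(desired_path))):
--         if index >= len(desired_path):
--             mismatch_node_index = index
--             break
--         elif index >= len(forward_hops_interfaces):
--             mismatch_node_index = index
--             break
--         elif forward_hops_interfaces[index] != desired_path[index]:
--             mismatch_node_index = index
--             break
--     return mismatch_node_index
-- ===== SOURCE B (Python) =====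
-- def find_point_where_desired_and_actual_paths_diverge(forward_hops_interfaces, desired_path):
--     # Identical paths never diverge.
--     if forward_hops_interfaces == desired_path:
--         return None
--     # Otherwise the divergence index is the length of the longest common
--     # prefix, which is at most min(len, len).  Prefix equality is monotone
--     # in the prefix length, so binary-search the largest k with equal
--     # slices of length k.
--     lo = 0
--     hi = min(len(forward_hops_interfaces), len(desired_path))
--     while lo < hi:
--         mid = (lo + hi + 1) // 2
--         if forward_hops_interfaces[:mid] == desired_path[:mid]:
--             lo = mid
--         else:
--             hi = mid - 1
--     return lo
-- ===== Notes on version B (the rewrite author's own statement) =====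
-- stated objective: alternative
-- what changed: Replaces A's linear max-length index loop with an equality pre-check plus a binary search over the longest-common-prefix length, comparing whole slices f[:mid] == d[:mid] at each probe instead of single elements.
import Mathlib
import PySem

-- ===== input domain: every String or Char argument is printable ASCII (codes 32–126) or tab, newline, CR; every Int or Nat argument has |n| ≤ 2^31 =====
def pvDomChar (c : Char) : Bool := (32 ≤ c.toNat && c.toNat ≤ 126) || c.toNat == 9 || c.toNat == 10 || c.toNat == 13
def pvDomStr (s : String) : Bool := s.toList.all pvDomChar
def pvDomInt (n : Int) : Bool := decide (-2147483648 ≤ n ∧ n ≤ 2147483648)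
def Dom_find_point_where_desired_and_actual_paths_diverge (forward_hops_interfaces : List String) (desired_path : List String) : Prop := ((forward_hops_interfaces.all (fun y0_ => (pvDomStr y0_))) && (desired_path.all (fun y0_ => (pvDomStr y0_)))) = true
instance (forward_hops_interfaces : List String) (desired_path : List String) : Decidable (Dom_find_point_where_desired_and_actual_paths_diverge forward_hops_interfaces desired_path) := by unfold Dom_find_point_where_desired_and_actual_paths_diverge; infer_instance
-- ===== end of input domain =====

-- B replaces A's linear index loop by an equality pre-check plus a binary search on the longest-common-prefix length (slice comparisons per probe); objective: alternative.


-- ===== PORT A =====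
-- A's for-loop over range(0, max(len f, len d)) with three guarded breaks.
def pvLoopA (f d : List String) : List Int → Option Int
  | [] => none
  | i :: rest =>
    if (d.length : Int) ≤ i then some i
    else if (f.length : Int) ≤ i then some i
    else if PySem.List.pyGet? f i ≠ PySem.List.pyGet? d i then some i
    else pvLoopA f d rest

def find_point_where_desired_and_actual_paths_diverge (forward_hops_interfaces : List String) (desired_path : List String) : Option Int :=
  pvLoopA forward_hops_interfaces desired_path
    (PySem.List.pyRange 0 (max (forward_hops_interfaces.length : Int) (desired_path.length : Int)) 1)

-- ===== PORT B =====
-- Termination of the binary search: the bracket hi - lo shrinks at every step.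
lemma pvMid_bounds (lo hi : Int) (h : lo < hi) :
    lo < PySem.Int.floordiv (lo + hi + 1) 2 ∧ PySem.Int.floordiv (lo + hi + 1) 2 ≤ hi := by
  rw [PySem.Int.floordiv_eq_ediv_of_pos (by omega)]
  omega

-- B's while-loop: binary search for the largest k with f[:k] == d[:k].
def pvBS (f d : List String) (lo hi : Int) : Int :=
  if h : lo < hi then
    let mid := PySem.Int.floordiv (lo + hi + 1) 2
    if PySem.List.slice f none (some mid) = PySem.List.slice d none (some mid) then
      pvBS f d mid hi
    else
      pvBS f d lo (mid - 1)
  else lo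
termination_by (hi - lo).toNat
decreasing_by
  · have := pvMid_bounds lo hi h; omega
  · have := pvMid_bounds lo hi h; omega

def find_point_where_desired_and_actual_paths_diverge_alt (forward_hops_interfaces : List String) (desired_path : List String) : Option Int :=
  if forward_hops_interfaces = desired_path then none
  else some (pvBS forward_hops_interfaces desired_path 0
      (min (forward_hops_interfaces.length : Int) (desired_path.length : Int)))

-- ===== PRECONDITION & SPEC =====
def Spec_find_point_where_desired_and_actual_paths_diverge (forward_hops_interfaces : List String) (desired_path : List String) (out : Option Int) : Prop := out = find_point_where_desired_and_actual_paths_diverge_alt forward_hops_interfaces desired_path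
instance (forward_hops_interfaces : List String) (desired_path : List String) (out : Option Int) : Decidable (Spec_find_point_where_desired_and_actual_paths_diverge forward_hops_interfaces desired_path out) := by unfold Spec_find_point_where_desired_and_actual_paths_diverge; infer_instance

-- ===== CLAIM (what is proved, stated in full; the proofs are below) =====
def Claim_equal_find_point_where_desired_and_actual_paths_diverge : Prop := ∀ (forward_hops_interfaces : List String) (desired_path : List String), Dom_find_point_where_desired_and_actual_paths_diverge forward_hops_interfaces desired_path → Spec_find_point_where_desired_and_actual_paths_diverge forward_hops_interfaces desired_path (find_point_where_desired_and_actual_paths_diverge forward_hops_interfaces desired_path)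

-- ===== LEMMAS AND PROOFS =====

-- Longest common prefix length: the canonical divergence index.
def pvCpl : List String → List String → Nat
  | x :: f, y :: d => if x = y then pvCpl f d + 1 else 0
  | _, _ => 0

lemma pvCpl_le_left : ∀ f d : List String, pvCpl f d ≤ f.length := by
  intro f
  induction f with
  | nil => intro d; cases d <;> simp [pvCpl]
  | cons x f ih =>
    intro d
    cases d with
    | nil => simp [pvCpl]
    | cons y d =>
      simp only [pvCpl, List.length_cons]
      split_ifs <;> [exact Nat.succ_le_succ (ih d); omega]

lemma pvCpl_le_right : ∀ f d : List String, pvCpl f d ≤ d.length := by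
  intro f
  induction f with
  | nil => intro d; cases d <;> simp [pvCpl]
  | cons x f ih =>
    intro d
    cases d with
    | nil => simp [pvCpl]
    | cons y d =>
      simp only [pvCpl, List.length_cons]
      split_ifs <;> [exact Nat.succ_le_succ (ih d); omega]

-- Prefix equality is monotone: take k agrees exactly up to the common prefix length.
lemma pvTake_iff : ∀ (f d : List String) (k : Nat), k ≤ f.length → k ≤ d.length →
    (f.take k = d.take k ↔ k ≤ pvCpl f d) := by
  intro f
  induction f with
  | nil =>
    intro d k hk _
    have hk0 : k = 0 := by simpa using hk
    subst hk0
    simp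
  | cons x f ih =>
    intro d k hkf hkd
    cases d with
    | nil =>
      have hk0 : k = 0 := by simpa using hkd
      subst hk0
      simp
    | cons y d =>
      cases k with
      | zero => simp
      | succ k =>
        by_cases hxy : x = y
        · subst hxy
          rw [show pvCpl (x :: f) (x :: d) = pvCpl f d + 1 from by simp [pvCpl]]
          simp only [List.take_succ_cons, List.cons.injEq, true_and]
          rw [ih d k (by simpa using hkf) (by simpa using hkd)]
          omega
        · simp [pvCpl, hxy]

-- Shifting the index stream by one on consed lists shifts A's loop result by one.
lemma pvLoopA_shift (x y : String) (f d : List String) (r : List Int)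
    (hr : ∀ i ∈ r, 0 ≤ i) :
    pvLoopA (x :: f) (y :: d) (r.map (· + 1)) = (pvLoopA f d r).map (· + 1) := by
  induction r with
  | nil => simp [pvLoopA]
  | cons i rest ih =>
    have hi : 0 ≤ i := hr i (by simp)
    obtain ⟨n, rfl⟩ : ∃ n : Nat, i = (n : Int) := ⟨i.toNat, (Int.toNat_of_nonneg hi).symm⟩
    have hd' : (((y :: d).length : Int) ≤ (n : Int) + 1) ↔ ((d.length : Int) ≤ (n : Int)) := by
      simp only [List.length_cons]; omega
    have hf' : (((x :: f).length : Int) ≤ (n : Int) + 1) ↔ ((f.length : Int) ≤ (n : Int)) := by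
      simp only [List.length_cons]; omega
    have hgx : PySem.List.pyGet? (x :: f) ((n : Int) + 1) = PySem.List.pyGet? f (n : Int) :=
      PySem.List.pyGet?_cons_succ x f n
    have hgy : PySem.List.pyGet? (y :: d) ((n : Int) + 1) = PySem.List.pyGet? d (n : Int) :=
      PySem.List.pyGet?_cons_succ y d n
    simp only [List.map_cons, pvLoopA, hd', hf', hgx, hgy]
    split_ifs <;> simp [ih (fun j hj => hr j (by simp [hj]))]

lemma pvRange_map_succ (n : Int) :
    (PySem.List.pyRange 0 n 1).map (· + 1) = PySem.List.pyRange 1 (n + 1) 1 := by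
  rw [PySem.List.pyRange_one, PySem.List.pyRange_one, List.map_map]
  have : n + 1 - 1 = n - 0 := by ring
  rw [this]
  exact List.map_congr_left (fun k _ => by simp [Function.comp]; ring)

-- Equal lists of equal length up to cpl: if f ≠ d then cpl < min-length mismatch or length mismatch; either way A stops at cpl.
lemma pvA_canon : ∀ (f d : List String),
    find_point_where_desired_and_actual_paths_diverge f d
      = (if f = d then none else some (pvCpl f d : Int)) := by
  intro f
  induction f with
  | nil =>
    intro d
    cases d with
    | nil => decide
    | cons y d =>
      unfold find_point_where_desired_and_actual_paths_diverge
      rw [PySem.List.pyRange_one_cons (by simp only [List.length_cons]; omega)]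
      simp [pvLoopA, pvCpl]
  | cons x f ih =>
    intro d
    cases d with
    | nil =>
      unfold find_point_where_desired_and_actual_paths_diverge
      rw [PySem.List.pyRange_one_cons (by simp only [List.length_cons]; omega)]
      simp [pvLoopA, pvCpl]
    | cons y d =>
      unfold find_point_where_desired_and_actual_paths_diverge
      have hmax : max ((x :: f).length : Int) ((y :: d).length : Int)
          = max (f.length : Int) (d.length : Int) + 1 := by
        simp only [List.length_cons]; omega
      rw [hmax, PySem.List.pyRange_one_cons (by omega)]
      rw [show (0 : Int) + 1 = 1 by norm_num, ← pvRange_map_succ]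
      simp only [pvLoopA]
      rw [if_neg (by simp only [List.length_cons]; omega),
          if_neg (by simp only [List.length_cons]; omega)]
      simp only [PySem.List.pyGet?_zero_cons]
      by_cases hxy : x = y
      · subst hxy
        rw [if_neg (by simp)]
        rw [pvLoopA_shift x x f d _ (fun i hi => by
          have := (PySem.List.mem_pyRange_one).1 hi; omega)]
        have hA := ih d
        unfold find_point_where_desired_and_actual_paths_diverge at hA
        rw [hA]
        by_cases hfd : f = d
        · simp [hfd]
        · have hne : (x :: f) ≠ (x :: d) := by simp [hfd]
          rw [show pvCpl (x :: f) (x :: d) = pvCpl f d + 1 from by simp [pvCpl]]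
          simp only [hfd, if_neg hne, if_false, Option.map_some]
          push_cast; ring_nf
      · rw [if_pos (by simp [hxy])]
        have : (x :: f) ≠ (y :: d) := by simp [hxy]
        simp [this, pvCpl, hxy]

-- The binary search homes in on the common prefix length.
lemma pvBS_correct (f d : List String) :
    ∀ n (lo hi : Int), (hi - lo).toNat = n → 0 ≤ lo → lo ≤ (pvCpl f d : Int) →
      (pvCpl f d : Int) ≤ hi → hi ≤ min (f.length : Int) (d.length : Int) →
      pvBS f d lo hi = (pvCpl f d : Int) := by
  intro n
  induction n using Nat.strong_induction_on with
  | _ n ih =>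
    intro lo hi hn hlo0 hlop hphi hhim
    rw [pvBS]
    by_cases h : lo < hi
    · rw [dif_pos h]
      have hmid := pvMid_bounds lo hi h
      set mid := PySem.Int.floordiv (lo + hi + 1) 2 with hmidDef
      have hmid0 : 0 ≤ mid := by omega
      have hslice_f : PySem.List.slice f none (some mid) = f.take mid.toNat :=
        PySem.List.slice_to f hmid0
      have hslice_d : PySem.List.slice d none (some mid) = d.take mid.toNat :=
        PySem.List.slice_to d hmid0
      have htiff := pvTake_iff f d mid.toNat (by omega) (by omega)
      by_cases hs : PySem.List.slice f none (some mid) = PySem.List.slice d none (some mid)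
      · rw [if_pos hs]
        rw [hslice_f, hslice_d] at hs
        have hmp : mid ≤ (pvCpl f d : Int) := by
          have := htiff.mp hs; omega
        exact ih (hi - mid).toNat (by omega) mid hi rfl (by omega) hmp hphi hhim
      · rw [if_neg hs]
        rw [hslice_f, hslice_d] at hs
        have hpm : (pvCpl f d : Int) ≤ mid - 1 := by
          by_contra hcon
          exact hs (htiff.mpr (by omega))
        exact ih (mid - 1 - lo).toNat (by omega) lo (mid - 1) rfl hlo0 hlop hpm (by omega)
    · rw [dif_neg h]; omega

-- If f ≠ d then pvCpl lies within both length bounds needed by the binary search.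
lemma pvMain (f d : List String) :
    find_point_where_desired_and_actual_paths_diverge f d
      = find_point_where_desired_and_actual_paths_diverge_alt f d := by
  rw [pvA_canon]
  unfold find_point_where_desired_and_actual_paths_diverge_alt
  by_cases hfd : f = d
  · simp [hfd]
  · rw [if_neg hfd, if_neg hfd]
    congr 1
    refine (pvBS_correct f d _ 0 (min (f.length : Int) (d.length : Int)) rfl le_rfl
      (by positivity) ?_ le_rfl).symm
    have h1 := pvCpl_le_left f d
    have h2 := pvCpl_le_right f d
    omega

-- ===== VERDICT (by name: the statement is the Claim_ definition above) =====
theorem find_point_where_desired_and_actual_paths_diverge_spec : Claim_equal_find_point_where_desired_and_actual_paths_diverge := by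
  intro f d _
  unfold Spec_find_point_where_desired_and_actual_paths_diverge
  exact pvMain f d
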